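-- pv_equiv track=rewrite | github.com/kavyagl2/Sublime-Agent | poem_generator.py | trim_poem
-- ===== SOURCE A (Python) =====
-- def trim_poem(poem):
--     lines = poem.strip().split('\n')
--     trimmed_poem = []
--     for i in range(0, len(lines), 2):
--         if i + 1 < len(lines):
--             trimmed_poem.append(lines[i] + " " + lines[i + 1])
--         else:
--             trimmed_poem.append(lines[i])
--     return '\n'.join(trimmed_poem)
-- ===== SOURCE B (Python) =====
-- def trim_poem(poem):
--     lines = poem.strip().split('\n')
--     evens = lines[0::2]
--     odds = lines[1::2]
--     joined = [a + " " + b for a, b in zip(evens, odds)]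
--     if len(lines) % 2:
--         joined.append(lines[-1])
--     return '\n'.join(joined)
-- ===== Notes on version B (the rewrite author's own statement) =====
-- stated objective: idiomatic
-- what changed: Replaces the index-stepping loop with its i+1 bounds check by zipping the two strided slices lines[0::2] and lines[1::2] and appending the odd trailing line once.
import Mathlib
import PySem

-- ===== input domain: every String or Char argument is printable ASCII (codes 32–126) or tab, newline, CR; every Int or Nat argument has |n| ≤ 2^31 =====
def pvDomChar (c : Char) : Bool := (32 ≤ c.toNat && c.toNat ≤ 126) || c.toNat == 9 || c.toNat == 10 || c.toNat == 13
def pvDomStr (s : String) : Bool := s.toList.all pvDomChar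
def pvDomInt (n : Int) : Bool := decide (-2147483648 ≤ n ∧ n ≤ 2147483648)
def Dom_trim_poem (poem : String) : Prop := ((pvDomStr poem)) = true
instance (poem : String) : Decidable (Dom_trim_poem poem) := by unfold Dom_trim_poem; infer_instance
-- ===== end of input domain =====

-- B joins pairs of poem lines by zipping the two strided slices lines[0::2] / lines[1::2]
-- (appending an odd trailing line), instead of A's index loop in steps of 2 with an i+1
-- bounds check; same O(n) cost, a more idiomatic decomposition.


-- ===== PORT A =====
-- literal port of A: for i in range(0, len(lines), 2): append lines[i](+" "+lines[i+1]);
-- lines[i] is ported as pyGetD with default "" (the loop only reads in-range indices, so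
-- Python never raises here and the default is never used).
def trim_poem (poem : String) : String :=
  let lines := (PySem.Str.split? (PySem.Str.strip poem) "\n").getD []
  let trimmed := (PySem.List.pyRange 0 (lines.length : Int) 2).foldl
    (fun acc i =>
      if i + 1 < (lines.length : Int) then
        acc ++ [PySem.List.pyGetD lines i "" ++ " " ++ PySem.List.pyGetD lines (i + 1) ""]
      else
        acc ++ [PySem.List.pyGetD lines i ""]) []
  PySem.Str.join "\n" trimmed

-- ===== PORT B =====
def trim_poem_alt (poem : String) : String :=
  let lines := (PySem.Str.split? (PySem.Str.strip poem) "\n").getD []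
  let evens := (PySem.List.slice? lines (some 0) none 2).getD []
  let odds := (PySem.List.slice? lines (some 1) none 2).getD []
  let joined := (evens.zip odds).map (fun p => p.1 ++ " " ++ p.2)
  let joined := if lines.length % 2 = 1 then joined ++ [PySem.List.pyGetD lines (-1) ""] else joined
  PySem.Str.join "\n" joined

-- ===== PRECONDITION & SPEC =====
def Spec_trim_poem (poem : String) (out : String) : Prop := out = trim_poem_alt poem
instance (poem : String) (out : String) : Decidable (Spec_trim_poem poem out) := by unfold Spec_trim_poem; infer_instance

-- ===== CLAIM (what is proved, stated in full; the proofs are below) =====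
def Claim_equal_trim_poem : Prop := ∀ (poem : String), Dom_trim_poem poem → Spec_trim_poem poem (trim_poem poem)

-- ===== LEMMAS AND PROOFS =====

-- folding "append one element per iteration, branch outside" is mapping
theorem foldl_append_ite {α β : Type} (p : α → Prop) [DecidablePred p] (u v : α → β)
    (l : List α) (acc : List β) :
    l.foldl (fun acc i => if p i then acc ++ [u i] else acc ++ [v i]) acc
      = acc ++ l.map (fun i => if p i then u i else v i) := by
  induction l generalizing acc with
  | nil => simp
  | cons a t ih => by_cases h : p a <;> simp [h, ih]

-- range(0, n, 2) enumerated as a map over List.range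
theorem pyRange_two (n : Nat) :
    PySem.List.pyRange 0 (n : Int) 2 = (List.range ((n + 1) / 2)).map (fun k => ((2 * k : Nat) : Int)) := by
  unfold PySem.List.pyRange
  norm_num
  have hc : (if 0 < n then (((n : Int) + 2 - 1) / 2).toNat else 0) = (n + 1) / 2 := by
    split_ifs <;> omega
  rw [hc]

theorem filterMap_eq_map_of {α β : Type} (f : α → Option β) (g : α → β) (l : List α)
    (h : ∀ a ∈ l, f a = some (g a)) : l.filterMap f = l.map g := by
  induction l with
  | nil => simp
  | cons a t ih =>
    simp only [List.filterMap_cons, h a (by simp), List.map_cons]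
    rw [ih (fun x hx => h x (by simp [hx]))]

-- lines[0::2]
theorem sliceB0 (L : List String) :
    (PySem.List.slice? L (some 0) none 2).getD []
      = (List.range ((L.length + 1) / 2)).map (fun k => L.getD (2 * k) "") := by
  unfold PySem.List.slice? PySem.List.sliceIndices
  norm_num
  have hc : (if 0 < L.length then (((L.length : Int) + 2 - 1) / 2).toNat else 0)
      = (L.length + 1) / 2 := by split_ifs <;> omega
  rw [hc]
  apply filterMap_eq_map_of
  intro k hk
  simp only [List.mem_range] at hk
  have h2 : ((2 : Int) * (k : Int)).toNat = 2 * k := by omega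
  have hlt : 2 * k < L.length := by omega
  rw [h2, List.getElem?_eq_getElem hlt]
  simp

-- lines[1::2]
theorem sliceB1 (L : List String) :
    (PySem.List.slice? L (some 1) none 2).getD []
      = (List.range (L.length / 2)).map (fun k => L.getD (2 * k + 1) "") := by
  unfold PySem.List.slice? PySem.List.sliceIndices
  norm_num
  rcases Nat.lt_or_ge 1 L.length with h | h
  · have hmin : min (1 : Int) (L.length : Int) = 1 := by omega
    rw [hmin, if_pos h]
    have hc : (((L.length : Int) - 1 + 2 - 1) / 2).toNat = L.length / 2 := by omega
    rw [hc]
    apply filterMap_eq_map_of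
    intro k hk
    simp only [List.mem_range] at hk
    have h2 : ((1 : Int) + 2 * (k : Int)).toNat = 2 * k + 1 := by omega
    have hlt : 2 * k + 1 < L.length := by omega
    rw [h2, List.getElem?_eq_getElem hlt]
    simp
  · rw [if_neg (by omega)]
    have : L.length / 2 = 0 := by omega
    simp [this]

-- the two list-building strategies produce the same list of joined lines
theorem core_eq (L : List String) :
    (List.range ((L.length + 1) / 2)).map
        (fun k => if ((2 * k : Nat) : Int) + 1 < (L.length : Int)
                  then L.getD (2 * k) "" ++ " " ++ L.getD (2 * k + 1) ""
                  else L.getD (2 * k) "")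
      = (let evens := (List.range ((L.length + 1) / 2)).map (fun k => L.getD (2 * k) "")
         let odds := (List.range (L.length / 2)).map (fun k => L.getD (2 * k + 1) "")
         let joined := (evens.zip odds).map (fun p => p.1 ++ " " ++ p.2)
         if L.length % 2 = 1 then joined ++ [PySem.List.pyGetD L (-1) ""] else joined) := by
  simp only
  have hZlen : (((List.range ((L.length + 1) / 2)).map (fun k => L.getD (2 * k) "")).zip
      ((List.range (L.length / 2)).map (fun k => L.getD (2 * k + 1) ""))).length = L.length / 2 := by
    simp only [List.length_zip, List.length_map, List.length_range]; omega
  apply List.ext_getElem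
  · split_ifs <;> simp only [List.length_map, List.length_range, List.length_append,
      List.length_cons, List.length_nil, hZlen] <;> omega
  · intro k hk hk2
    simp only [List.length_map, List.length_range] at hk
    by_cases hlast : 2 * k + 1 < L.length
    · have hcond : ((2 * k : Nat) : Int) + 1 < (L.length : Int) := by exact_mod_cast hlast
      split_ifs with hpar
      · rw [List.getElem_append_left (by simp only [List.length_map, hZlen]; omega)]
        simp only [List.getElem_map, List.getElem_zip, List.getElem_range, if_pos hcond]
      · simp only [List.getElem_map, List.getElem_zip, List.getElem_range, if_pos hcond]
    · have hodd : L.length = 2 * k + 1 := by omega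
      have hpar : L.length % 2 = 1 := by omega
      have hcond : ¬ (((2 * k : Nat) : Int) + 1 < (L.length : Int)) := by push_cast; omega
      simp only [hpar, reduceIte]
      have hmlen : ((((List.range ((L.length + 1) / 2)).map (fun k => L.getD (2 * k) "")).zip
          ((List.range (L.length / 2)).map (fun k => L.getD (2 * k + 1) ""))).map
          (fun p => p.1 ++ " " ++ p.2)).length = k := by
        simp only [List.length_map, hZlen]; omega
      rw [List.getElem_append_right (by omega)]
      have hmem : 2 * k < L.length := by omega
      simp only [List.getElem_map, List.getElem_range, if_neg hcond, hmlen]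
      have hget1 : PySem.List.pyGetD L (-1) "" = L.getD (2 * k) "" := by
        simp only [PySem.List.pyGetD, PySem.List.pyGet?, PySem.List.pyIdx?]
        rw [if_neg (by omega), if_pos (by omega)]
        have h3 : L.length - ((-(-1 : Int)).toNat) = 2 * k := by omega
        rw [h3, Option.bind_some, List.getElem?_eq_getElem hmem, Option.getD_some,
          List.getD_eq_getElem L "" hmem]
      simp [hget1]

-- the full pipeline on an arbitrary line list
theorem main_core (L : List String) :
    (PySem.List.pyRange 0 (L.length : Int) 2).foldl
      (fun acc i =>
        if i + 1 < (L.length : Int) then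
          acc ++ [PySem.List.pyGetD L i "" ++ " " ++ PySem.List.pyGetD L (i + 1) ""]
        else
          acc ++ [PySem.List.pyGetD L i ""]) []
    = (let evens := (PySem.List.slice? L (some 0) none 2).getD []
       let odds := (PySem.List.slice? L (some 1) none 2).getD []
       let joined := (evens.zip odds).map (fun p => p.1 ++ " " ++ p.2)
       if L.length % 2 = 1 then joined ++ [PySem.List.pyGetD L (-1) ""] else joined) := by
  simp only
  rw [pyRange_two, foldl_append_ite, List.nil_append, List.map_map, sliceB0, sliceB1]
  have hc := core_eq L
  simp only at hc
  rw [← hc]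
  apply List.map_congr_left
  intro k _
  simp only [Function.comp, PySem.List.pyGetD_natCast]
  split_ifs with h
  · have h1 : ((2 * k : Nat) : Int) + 1 = ((2 * k + 1 : Nat) : Int) := by push_cast; ring
    rw [h1, PySem.List.pyGetD_natCast]
  · rfl

-- ===== VERDICT (by name: the statement is the Claim_ definition above) =====
theorem trim_poem_spec : Claim_equal_trim_poem := by
  intro poem _
  unfold Spec_trim_poem trim_poem trim_poem_alt
  exact congrArg (PySem.Str.join "\n") (main_core _)
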